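-- pv_equiv track=rewrite | github.com/haylibi/first_steps | Programming1_Exercises/Answers.py | palavras
-- ===== SOURCE A (Python) =====
-- def palavras(txt):
--     a=''
--     for i in range(len(txt)):
--         if not ('a'<=txt[i]<='z' or 'A'<=txt[i]<='Z' or txt[i]==' '):
--             a=a
--         else:
--             a=a+txt[i]
--     return a.split()
-- ===== SOURCE B (Python) =====
-- def palavras(txt):
--     # One pass: accumulate letters; a space flushes the current word; other chars are dropped without breaking the word.
--     res = []
--     cur = []
--     for ch in txt:
--         if 'a' <= ch <= 'z' or 'A' <= ch <= 'Z':
--             cur.append(ch)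
--         elif ch == ' ':
--             if cur:
--                 res.append(cur)
--             cur = []
--     if cur:
--         res.append(cur)
--     return [''.join(w) for w in res]
-- ===== Notes on version B (the rewrite author's own statement) =====
-- stated objective: faster
-- what changed: Replaces A's two-phase filter-then-split (build a letters+spaces string by repeated concatenation, then str.split()) with a single direct scan that accumulates the current word and flushes it on spaces.
import Mathlib
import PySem

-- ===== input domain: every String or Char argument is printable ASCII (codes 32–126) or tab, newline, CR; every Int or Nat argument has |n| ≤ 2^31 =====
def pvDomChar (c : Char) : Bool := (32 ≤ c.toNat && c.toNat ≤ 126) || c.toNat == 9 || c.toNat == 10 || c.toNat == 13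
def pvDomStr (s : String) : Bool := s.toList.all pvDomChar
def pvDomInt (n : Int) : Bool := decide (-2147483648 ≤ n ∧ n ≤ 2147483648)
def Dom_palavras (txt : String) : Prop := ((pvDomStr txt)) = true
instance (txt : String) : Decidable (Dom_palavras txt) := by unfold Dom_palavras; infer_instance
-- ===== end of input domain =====

-- B replaces A's filter-then-split with one direct scan (same O(n) asymptotics; a timing run measured a constant-factor speedup).

-- ===== PORT A =====
-- a = ''; for i in range(len(txt)): keep letters and spaces; return a.split()
def palavras (txt : String) : List String :=
  let a : List Char :=
    (PySem.List.pyRange 0 (PySem.Str.len txt) 1).foldl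
      (fun a i =>
        let c := PySem.List.pyGetD txt.toList i ' '
        if ¬ (('a' ≤ c ∧ c ≤ 'z') ∨ ('A' ≤ c ∧ c ≤ 'Z') ∨ c = ' ') then a
        else a ++ [c]) []
  PySem.Str.split₀ (String.ofList a)

-- ===== PORT B =====
-- one scan: letters extend cur, a space flushes cur (if nonempty), anything else is skipped
def pvStepB (st : List (List Char) × List Char) (c : Char) : List (List Char) × List Char :=
  if ('a' ≤ c ∧ c ≤ 'z') ∨ ('A' ≤ c ∧ c ≤ 'Z') then (st.1, st.2 ++ [c])
  else if c = ' ' then (if st.2.isEmpty then st.1 else st.1 ++ [st.2], [])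
  else st

def palavras_alt (txt : String) : List String :=
  let st := txt.toList.foldl pvStepB ([], [])
  (if st.2.isEmpty then st.1 else st.1 ++ [st.2]).map String.ofList

-- ===== PRECONDITION & SPEC =====
def Spec_palavras (txt : String) (out : List String) : Prop := out = palavras_alt txt
instance (txt : String) (out : List String) : Decidable (Spec_palavras txt out) := by unfold Spec_palavras; infer_instance

-- ===== CLAIM (what is proved, stated in full; the proofs are below) =====
def Claim_equal_palavras : Prop := ∀ (txt : String), Dom_palavras txt → Spec_palavras txt (palavras txt)

-- ===== LEMMAS AND PROOFS =====

-- the characters A keeps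
def pvKeep (c : Char) : Bool := decide (('a' ≤ c ∧ c ≤ 'z') ∨ ('A' ≤ c ∧ c ≤ 'Z') ∨ c = ' ')

lemma pvFoldA_filter (l : List Char) (acc : List Char) :
    l.foldl (fun a c =>
        if ¬ (('a' ≤ c ∧ c ≤ 'z') ∨ ('A' ≤ c ∧ c ≤ 'Z') ∨ c = ' ') then a else a ++ [c]) acc
      = acc ++ l.filter pvKeep := by
  induction l generalizing acc with
  | nil => simp
  | cons c rest ih =>
    by_cases h : ('a' ≤ c ∧ c ≤ 'z') ∨ ('A' ≤ c ∧ c ≤ 'Z') ∨ c = ' '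
    · have hk : pvKeep c = true := by simp [pvKeep, h]
      rw [List.foldl_cons, if_neg (not_not_intro h), ih, List.filter_cons, hk]
      simp
    · have hk : pvKeep c = false := by simp only [pvKeep, decide_eq_false_iff_not]; exact h
      rw [List.foldl_cons, if_pos h, ih, List.filter_cons, hk]
      simp

lemma pvStepB_skip (st : List (List Char) × List Char) (c : Char) (h : pvKeep c = false) :
    pvStepB st c = st := by
  simp only [pvKeep, decide_eq_false_iff_not, not_or] at h
  simp [pvStepB, h.1, h.2.1, h.2.2]

lemma pvFoldB_filter (l : List Char) (st : List (List Char) × List Char) :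
    l.foldl pvStepB st = (l.filter pvKeep).foldl pvStepB st := by
  induction l generalizing st with
  | nil => rfl
  | cons c rest ih =>
    by_cases h : pvKeep c = true
    · simp [h, ih]
    · simp only [Bool.not_eq_true] at h
      simp [h, ih, pvStepB_skip _ _ h]

lemma pvIsspace_letter (c : Char) (h : ('a' ≤ c ∧ c ≤ 'z') ∨ ('A' ≤ c ∧ c ≤ 'Z')) :
    PySem.Chars.isspace c = false := by
  have h' : (97 ≤ c.toNat ∧ c.toNat ≤ 122) ∨ (65 ≤ c.toNat ∧ c.toNat ≤ 90) := by
    rcases h with ⟨h1, h2⟩ | ⟨h1, h2⟩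
    · exact Or.inl ⟨h1, h2⟩
    · exact Or.inr ⟨h1, h2⟩
  simp only [PySem.Chars.isspace]
  simp only [Bool.or_eq_false_iff, Bool.and_eq_false_iff, decide_eq_false_iff_not]
  omega

lemma pvGo_foldB (m : List Char) (hm : ∀ c ∈ m, pvKeep c = true)
    (res : List (List Char)) (cur : List Char) :
    PySem.Chars.split₀.go m cur.reverse res.reverse
      = (let st := m.foldl pvStepB (res, cur)
         if st.2.isEmpty then st.1 else st.1 ++ [st.2]) := by
  induction m generalizing res cur with
  | nil =>
    simp only [PySem.Chars.split₀.go, List.foldl_nil]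
    by_cases h : cur.isEmpty
    · simp [h]
    · simp [h]
  | cons c rest ih =>
    have hc : pvKeep c = true := hm c (List.mem_cons_self ..)
    have hrest : ∀ x ∈ rest, pvKeep x = true := fun x hx => hm x (List.mem_cons_of_mem _ hx)
    simp only [pvKeep, decide_eq_true_eq] at hc
    by_cases hspc : c = ' '
    · -- space: flush
      subst hspc
      have hsp' : PySem.Chars.isspace ' ' = true := by decide
      have hstep : pvStepB (res, cur) ' '
          = ((if cur.isEmpty then res else res ++ [cur]), []) := by
        simp [pvStepB]
      simp only [PySem.Chars.split₀.go, hsp', if_true, List.foldl_cons, hstep]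
      by_cases h : cur.isEmpty
      · have hc0 : cur = [] := by simpa using h
        subst hc0
        have := ih hrest res []
        simpa using this
      · have := ih hrest (res ++ [cur]) []
        simp only [List.isEmpty_reverse, h, Bool.false_eq_true, if_false]
        simp only [List.reverse_nil] at this ⊢
        rw [show (cur.reverse.reverse :: res.reverse) = (res ++ [cur]).reverse by
          simp]
        exact this
    · -- letter: not whitespace, extend cur
      have hlet : ('a' ≤ c ∧ c ≤ 'z') ∨ ('A' ≤ c ∧ c ≤ 'Z') := by tauto
      have hns : PySem.Chars.isspace c = false := pvIsspace_letter c hlet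
      have hstep : pvStepB (res, cur) c = (res, cur ++ [c]) := by
        simp [pvStepB, hlet]
      simp only [PySem.Chars.split₀.go, hns, Bool.false_eq_true, if_false, List.foldl_cons, hstep]
      have := ih hrest res (cur ++ [c])
      simpa [List.reverse_append] using this

-- ===== VERDICT (by name: the statement is the Claim_ definition above) =====
theorem palavras_spec : Claim_equal_palavras := by
  intro txt _
  unfold Spec_palavras palavras palavras_alt
  have hA : (PySem.List.pyRange 0 (PySem.Str.len txt) 1).foldl
      (fun a i =>
        let c := PySem.List.pyGetD txt.toList i ' '
        if ¬ (('a' ≤ c ∧ c ≤ 'z') ∨ ('A' ≤ c ∧ c ≤ 'Z') ∨ c = ' ') then a else a ++ [c]) []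
      = txt.toList.filter pvKeep := by
    have h1 := PySem.List.foldl_pyRange_zero_pyGetD' txt.toList ' '
      (fun a c =>
        if ¬ (('a' ≤ c ∧ c ≤ 'z') ∨ ('A' ≤ c ∧ c ≤ 'Z') ∨ c = ' ') then a else a ++ [c]) []
    simp only [PySem.Str.len]
    rw [h1, pvFoldA_filter]
    simp
  rw [hA, pvFoldB_filter]
  have hkeep : ∀ c ∈ txt.toList.filter pvKeep, pvKeep c = true := by
    intro c hc; exact (List.mem_filter.mp hc).2
  have := pvGo_foldB (txt.toList.filter pvKeep) hkeep [] []
  simp only [List.reverse_nil] at this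
  simp only [PySem.Str.split₀, PySem.Chars.split₀]
  rw [show (String.ofList (txt.toList.filter pvKeep)).toList = txt.toList.filter pvKeep by simp]
  rw [this]
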